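-- pv_equiv track=rewrite | github.com/findaikichi-hub/ai-company-devcrew-jp | 01_original_source/devCrew_s_upstream/tools/ai_reasoning/chain_of_thought.py | _has_contradictions
-- ===== SOURCE A (Python) =====
-- from typing import List, Dict, Any, Optional, Callable
--
-- def _has_contradictions(thoughts: List[str]) -> bool:
--     """Check for contradictions in thoughts."""
--     # Simple contradiction detection
--     contradiction_pairs = [
--         ("yes", "no"),
--         ("true", "false"),
--         ("should", "should not"),
--         ("will", "will not")
--     ]
--
--     for i, thought in enumerate(thoughts):
--         for j, other_thought in enumerate(thoughts[i+1:], start=i+1):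
--             for pos, neg in contradiction_pairs:
--                 if pos in thought and neg in other_thought:
--                     return True
--                 if neg in thought and pos in other_thought:
--                     return True
--
--     return False
-- ===== SOURCE B (Python) =====
-- def _has_contradictions(thoughts):
--     """Check for contradictions in thoughts (single pass over the list)."""
--     contradiction_pairs = [
--         ("yes", "no"),
--         ("true", "false"),
--         ("should", "should not"),
--         ("will", "will not")
--     ]
--     seen = set()  # keywords contained in some earlier thought
--     for thought in thoughts:
--         for pos, neg in contradiction_pairs:
--             if (pos in seen and neg in thought) or (neg in seen and pos in thought):
--                 return True
--         for pos, neg in contradiction_pairs: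
--             if pos in thought:
--                 seen.add(pos)
--             if neg in thought:
--                 seen.add(neg)
--     return False
-- ===== Notes on version B (the rewrite author's own statement) =====
-- stated objective: faster
-- what changed: Replaced the quadratic all-pairs scan with a single pass that keeps a set of keywords already seen in earlier thoughts and checks each thought against that set.
import Mathlib
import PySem

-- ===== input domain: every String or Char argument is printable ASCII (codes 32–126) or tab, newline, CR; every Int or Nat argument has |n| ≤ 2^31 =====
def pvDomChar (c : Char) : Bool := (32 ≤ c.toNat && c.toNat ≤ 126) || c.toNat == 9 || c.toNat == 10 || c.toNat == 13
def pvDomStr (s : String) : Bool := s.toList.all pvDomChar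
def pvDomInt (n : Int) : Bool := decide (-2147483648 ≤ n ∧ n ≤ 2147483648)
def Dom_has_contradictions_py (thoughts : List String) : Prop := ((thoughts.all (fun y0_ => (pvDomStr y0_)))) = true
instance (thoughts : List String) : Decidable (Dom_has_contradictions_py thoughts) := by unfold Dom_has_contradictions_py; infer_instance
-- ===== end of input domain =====

-- B is one pass keeping the set of keywords seen in earlier thoughts (O(n·k) vs A's O(n²·k) substring checks).
-- ===== PORT A =====
-- A: for each thought, scan every later thought for a (pos, neg) contradiction pair (either direction).
def pvPairs : List (String × String) :=
  [("yes", "no"), ("true", "false"), ("should", "should not"), ("will", "will not")]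

-- the inner pair loop of A: 'pos in thought and neg in other' or 'neg in thought and pos in other'
def pvCross (t o : String) : Bool :=
  pvPairs.any fun pn =>
    (PySem.Str.isIn pn.1 t && PySem.Str.isIn pn.2 o) ||
    (PySem.Str.isIn pn.2 t && PySem.Str.isIn pn.1 o)

def has_contradictions_py (thoughts : List String) : Bool :=
  match thoughts with
  | [] => false
  | t :: rest => rest.any (pvCross t) || has_contradictions_py rest

-- ===== PORT B =====
-- B: one pass; 'seen' is the set of keywords contained in some earlier thought.
def pvHit (seen : PySem.Set String) (t : String) : Bool :=
  pvPairs.any fun pn =>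
    (PySem.Set.contains seen pn.1 && PySem.Str.isIn pn.2 t) ||
    (PySem.Set.contains seen pn.2 && PySem.Str.isIn pn.1 t)

-- body of B's second pair loop: conditionally add both keywords of one pair
def pvStep (t : String) (s : PySem.Set String) (pn : String × String) : PySem.Set String :=
  let s1 := if PySem.Str.isIn pn.1 t then PySem.Set.add s pn.1 else s
  if PySem.Str.isIn pn.2 t then PySem.Set.add s1 pn.2 else s1

def pvUpd (seen : PySem.Set String) (t : String) : PySem.Set String :=
  pvPairs.foldl (pvStep t) seen

def pvBLoop (seen : PySem.Set String) (thoughts : List String) : Bool :=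
  match thoughts with
  | [] => false
  | t :: rest => pvHit seen t || pvBLoop (pvUpd seen t) rest

def has_contradictions_py_alt (thoughts : List String) : Bool :=
  pvBLoop PySem.Set.empty thoughts

-- ===== PRECONDITION & SPEC =====
def Spec_has_contradictions_py (thoughts : List String) (out : Bool) : Prop := out = has_contradictions_py_alt thoughts
instance (thoughts : List String) (out : Bool) : Decidable (Spec_has_contradictions_py thoughts out) := by unfold Spec_has_contradictions_py; infer_instance

-- ===== CLAIM (what is proved, stated in full; the proofs are below) =====
def Claim_equal_has_contradictions_py : Prop := ∀ (thoughts : List String), Dom_has_contradictions_py thoughts → Spec_has_contradictions_py thoughts (has_contradictions_py thoughts)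

-- ===== LEMMAS AND PROOFS =====

lemma pv_contains_step (seen : PySem.Set String) (t k : String) (pn : String × String) :
    PySem.Set.contains (pvStep t seen pn) k = true ↔
    PySem.Set.contains seen k = true ∨
      (k = pn.1 ∧ PySem.Str.isIn pn.1 t = true) ∨ (k = pn.2 ∧ PySem.Str.isIn pn.2 t = true) := by
  rcases Bool.eq_false_or_eq_true (PySem.Str.isIn pn.1 t) with h1 | h1 <;>
    rcases Bool.eq_false_or_eq_true (PySem.Str.isIn pn.2 t) with h2 | h2 <;>
      simp only [PySem.Str.isIn_eq] at h1 h2 <;>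
      simp [pvStep, h1, h2, PySem.Set.contains_iff, PySem.Set.mem_add] <;> tauto

lemma pv_contains_foldl_upd (ps : List (String × String)) (seen : PySem.Set String)
    (t k : String) :
    PySem.Set.contains (ps.foldl (pvStep t) seen) k = true ↔
    PySem.Set.contains seen k = true ∨
      ∃ pn ∈ ps, (k = pn.1 ∧ PySem.Str.isIn pn.1 t = true) ∨
                 (k = pn.2 ∧ PySem.Str.isIn pn.2 t = true) := by
  induction ps generalizing seen with
  | nil => simp
  | cons pn ps ih =>
    simp only [List.foldl_cons, ih, pv_contains_step, List.exists_mem_cons_iff]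
    exact or_assoc

lemma pv_contains_upd (seen : PySem.Set String) (t k : String) :
    PySem.Set.contains (pvUpd seen t) k = true ↔
    PySem.Set.contains seen k = true ∨
      ∃ pn ∈ pvPairs, (k = pn.1 ∧ PySem.Str.isIn pn.1 t = true) ∨
                      (k = pn.2 ∧ PySem.Str.isIn pn.2 t = true) := by
  unfold pvUpd
  exact pv_contains_foldl_upd pvPairs seen t k

-- turn the per-keyword iff into a Bool equation
lemma pv_upd_one (seen : PySem.Set String) (t k : String)
    (h : PySem.Set.contains (pvUpd seen t) k = true ↔
         PySem.Set.contains seen k = true ∨ PySem.Str.isIn k t = true) :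
    PySem.Set.contains (pvUpd seen t) k =
      (PySem.Set.contains seen k || PySem.Str.isIn k t) := by
  cases hc : PySem.Set.contains seen k <;> cases hi : PySem.Str.isIn k t <;> simp_all

-- two small Boolean shuffles (checked by decide)
lemma pv_grp : ∀ (c1 a1 b1 c2 a2 b2 : Bool),
    ((c1 || a1) && b1 || (c2 || a2) && b2) =
    ((c1 && b1 || c2 && b2) || (a1 && b1 || a2 && b2)) := by decide

lemma pv_sh : ∀ (x1 y1 x2 y2 x3 y3 x4 y4 : Bool),
    ((x1 || y1) || ((x2 || y2) || ((x3 || y3) || (x4 || y4)))) =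
    ((x1 || (x2 || (x3 || x4))) || (y1 || (y2 || (y3 || y4)))) := by decide

lemma pv_hit_upd (seen : PySem.Set String) (t o : String) :
    pvHit (pvUpd seen t) o = (pvHit seen o || pvCross t o) := by
  have hy := pv_upd_one seen t "yes" (by rw [pv_contains_upd]; simp [pvPairs])
  have hn := pv_upd_one seen t "no" (by rw [pv_contains_upd]; simp [pvPairs])
  have ht := pv_upd_one seen t "true" (by rw [pv_contains_upd]; simp [pvPairs])
  have hf := pv_upd_one seen t "false" (by rw [pv_contains_upd]; simp [pvPairs])
  have hs := pv_upd_one seen t "should" (by rw [pv_contains_upd]; simp [pvPairs])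
  have hsn := pv_upd_one seen t "should not" (by rw [pv_contains_upd]; simp [pvPairs])
  have hw := pv_upd_one seen t "will" (by rw [pv_contains_upd]; simp [pvPairs])
  have hwn := pv_upd_one seen t "will not" (by rw [pv_contains_upd]; simp [pvPairs])
  simp only [pvHit, pvCross, pvPairs, List.any_cons, List.any_nil, Bool.or_false,
    hy, hn, ht, hf, hs, hsn, hw, hwn]
  simp only [pv_grp]
  exact pv_sh _ _ _ _ _ _ _ _

lemma pv_bLoop_iff (l : List String) : ∀ seen,
    pvBLoop seen l = true ↔ (∃ o ∈ l, pvHit seen o = true) ∨ has_contradictions_py l = true := by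
  induction l with
  | nil => intro seen; simp [pvBLoop, has_contradictions_py]
  | cons t rest ih =>
    intro seen
    simp only [pvBLoop, has_contradictions_py, Bool.or_eq_true, ih, pv_hit_upd,
      List.any_eq_true, List.exists_mem_cons_iff, and_or_left, exists_or]
    simp only [← or_assoc]

lemma pv_hit_empty (o : String) : pvHit PySem.Set.empty o = false := by
  simp [pvHit, pvPairs, PySem.Set.empty]

-- ===== VERDICT (by name: the statement is the Claim_ definition above) =====
theorem has_contradictions_py_spec : Claim_equal_has_contradictions_py := by
  intro thoughts _
  unfold Spec_has_contradictions_py has_contradictions_py_alt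
  have h := pv_bLoop_iff thoughts PySem.Set.empty
  simp only [pv_hit_empty, Bool.false_eq_true, and_false, exists_false, false_or] at h
  cases hA : has_contradictions_py thoughts <;>
    cases hB : pvBLoop PySem.Set.empty thoughts <;> simp_all
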